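-- pv_equiv track=rewrite | github.com/RuSwift/escrow | services/dashboard.py | _fiat_involving_pairs
-- ===== SOURCE A (Python) =====
-- from typing import Any, Dict, List, Optional, Tuple, Type
--
-- def _fiat_involving_pairs(
--     fiats: List[str],
--     stable_symbols: List[str],
-- ) -> List[tuple[str, str]]:
--     """
--     Все упорядоченные пары (base, quote), base != quote, где оба кода из объединения
--     фиатов и стейблов, и хотя бы один код — из ``fiats`` (фиаты сервиса).
--     Так попадают кроссы вроде USDT/RUB с Rapira, но не пара только между стейблами.
--     """
--     fiat_set = set(fiats)
--     universe: List[str] = list(fiats)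
--     for s in stable_symbols:
--         if s not in fiat_set:
--             universe.append(s)
--     out: List[tuple[str, str]] = []
--     for base in universe:
--         for quote in universe:
--             if base == quote:
--                 continue
--             if base not in fiat_set and quote not in fiat_set:
--                 continue
--             out.append((base, quote))
--     return out
-- ===== SOURCE B (Python) =====
-- def _fiat_involving_pairs(fiats, stable_symbols):
--     fiat_set = set(fiats)
--     universe = fiats + [s for s in stable_symbols if s not in fiat_set]
--     # memoized row table: each distinct symbol's quote-row is computed once
--     rows = {}
--     for v in universe:
--         if v not in rows:
--             if v in fiat_set:
--                 rows[v] = [(v, q) for q in universe if q != v]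
--             else:
--                 rows[v] = [(v, q) for q in fiats]
--     out = []
--     for v in universe:
--         out += rows[v]
--     return out
-- ===== Notes on version B (the rewrite author's own statement) =====
-- stated objective: alternative
-- what changed: Replaces A's guarded nested loop with a memoized row table: a dict built once maps each distinct symbol of the universe to its whole quote-row (universe minus equal values for a fiat, the fiat list for a stable), and the output is the concatenation of dict lookups along the universe, so the guarded inner scan disappears for every repeated symbol.
import Mathlib
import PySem

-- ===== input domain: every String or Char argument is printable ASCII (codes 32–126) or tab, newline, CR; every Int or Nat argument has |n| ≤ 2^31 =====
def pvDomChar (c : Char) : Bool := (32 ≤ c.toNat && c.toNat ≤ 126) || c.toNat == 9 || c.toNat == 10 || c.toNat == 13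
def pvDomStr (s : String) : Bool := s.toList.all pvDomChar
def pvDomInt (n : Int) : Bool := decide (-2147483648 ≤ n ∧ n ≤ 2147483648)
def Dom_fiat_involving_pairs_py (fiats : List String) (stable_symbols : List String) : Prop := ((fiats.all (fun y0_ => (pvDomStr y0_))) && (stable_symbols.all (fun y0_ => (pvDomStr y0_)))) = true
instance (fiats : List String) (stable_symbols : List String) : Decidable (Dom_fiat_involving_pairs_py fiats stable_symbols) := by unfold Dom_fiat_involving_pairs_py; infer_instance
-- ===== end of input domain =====

-- B replaces A's guarded nested loop by a memoized row table: a dict maps each distinct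
-- universe symbol to its whole quote-row, and the output is the concatenation of dict
-- lookups along the universe; same result, objective: alternative.

-- ===== PORT A =====
-- literal transliteration of _fiat_involving_pairs
def fiat_involving_pairs_py (fiats : List String) (stable_symbols : List String) : List (String × String) :=
  let fiat_set : PySem.Set String := PySem.Set.ofList fiats
  let univrs : List String :=
    stable_symbols.foldl (fun u s => if PySem.Set.contains fiat_set s then u else u ++ [s]) fiats
  univrs.foldl (fun out base =>
    univrs.foldl (fun out quote =>
      if base == quote then out
      else if !(PySem.Set.contains fiat_set base) && !(PySem.Set.contains fiat_set quote) then out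
      else out ++ [(base, quote)]) out) []

-- ===== PORT B =====
-- literal transliteration of Source B: memoized row table, then concatenation of lookups
def fiat_involving_pairs_py_alt (fiats : List String) (stable_symbols : List String) : List (String × String) :=
  let fiat_set : PySem.Set String := PySem.Set.ofList fiats
  let univrs : List String := fiats ++ stable_symbols.filter (fun s => !(PySem.Set.contains fiat_set s))
  let rows : PySem.Dict String (List (String × String)) :=
    univrs.foldl (fun d v =>
      if d.contains v then d
      else d.insert v
        (if PySem.Set.contains fiat_set v
         then (univrs.filter (fun q => q != v)).map (fun q => (v, q))
         else fiats.map (fun q => (v, q)))) PySem.Dict.empty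
  univrs.foldl (fun out v => out ++ rows.getD v []) []

-- ===== PRECONDITION & SPEC =====
def Spec_fiat_involving_pairs_py (fiats : List String) (stable_symbols : List String) (out : List (String × String)) : Prop := out = fiat_involving_pairs_py_alt fiats stable_symbols
instance (fiats : List String) (stable_symbols : List String) (out : List (String × String)) : Decidable (Spec_fiat_involving_pairs_py fiats stable_symbols out) := by unfold Spec_fiat_involving_pairs_py; infer_instance

-- ===== CLAIM (what is proved, stated in full; the proofs are below) =====
def Claim_equal_fiat_involving_pairs_py : Prop := ∀ (fiats : List String) (stable_symbols : List String), Dom_fiat_involving_pairs_py fiats stable_symbols → Spec_fiat_involving_pairs_py fiats stable_symbols (fiat_involving_pairs_py fiats stable_symbols)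

-- ===== LEMMAS AND PROOFS =====

-- A's pair-emission condition for a fixed base, as one Bool predicate
def pvPred (fs : PySem.Set String) (base quote : String) : Bool :=
  !(base == quote) && !(!(PySem.Set.contains fs base) && !(PySem.Set.contains fs quote))

theorem pv_inner (fs : PySem.Set String) (base : String) (l : List String)
    (out : List (String × String)) :
    l.foldl (fun out quote =>
      if base == quote then out
      else if !(PySem.Set.contains fs base) && !(PySem.Set.contains fs quote) then out
      else out ++ [(base, quote)]) out
      = out ++ ((l.filter (pvPred fs base)).map (fun q => (base, q))) := by
  have h : (fun (out : List (String × String)) quote =>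
      if base == quote then out
      else if !(PySem.Set.contains fs base) && !(PySem.Set.contains fs quote) then out
      else out ++ [(base, quote)])
      = (fun out quote => if pvPred fs base quote then out ++ [(base, quote)] else out) := by
    funext o q
    cases hbq : base == q <;>
      cases hc : (!(PySem.Set.contains fs base) && !(PySem.Set.contains fs q)) <;>
        simp only [pvPred, hbq, hc] <;> simp
  rw [h]
  exact PySem.List.foldl_append_if (pvPred fs base) (Prod.mk base) l out

theorem pv_univrs (fiats stable_symbols : List String) :
    stable_symbols.foldl
      (fun u s => if PySem.Set.contains (PySem.Set.ofList fiats) s then u else u ++ [s]) fiats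
    = fiats ++ stable_symbols.filter (fun s => !(PySem.Set.contains (PySem.Set.ofList fiats) s)) := by
  have h : (fun (u : List String) s =>
      if PySem.Set.contains (PySem.Set.ofList fiats) s then u else u ++ [s])
      = (fun u s => if !(PySem.Set.contains (PySem.Set.ofList fiats) s) then u ++ [s] else u) := by
    funext u s
    cases PySem.Set.contains (PySem.Set.ofList fiats) s <;> simp
  rw [h]
  have := PySem.List.foldl_append_if
    (fun s => !(PySem.Set.contains (PySem.Set.ofList fiats) s)) (fun s => s) stable_symbols fiats
  simpa using this

-- the memoization loop: invariant "every contained key maps to f of itself" is preserved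
theorem pv_memo_inv (f : String → List (String × String)) :
    ∀ (l : List String) (d : PySem.Dict String (List (String × String))),
      (∀ k, d.contains k = true → d.getD k [] = f k) →
      ∀ k, (l.foldl (fun d v => if d.contains v then d else d.insert v (f v)) d).contains k = true →
        (l.foldl (fun d v => if d.contains v then d else d.insert v (f v)) d).getD k [] = f k := by
  intro l
  induction l with
  | nil => intro d hd k; exact hd k
  | cons a t ih =>
    intro d hd k
    simp only [List.foldl_cons]
    apply ih
    intro k' hk'
    by_cases hca : d.contains a = true
    · simp only [hca, if_true] at hk' ⊢; exact hd k' hk'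
    · simp only [hca, if_false, Bool.false_eq_true] at hk' ⊢
      rw [PySem.Dict.getD_insert]
      split_ifs with he
      · exact he ▸ rfl
      · apply hd
        rw [PySem.Dict.contains_insert] at hk'
        simpa [he] using hk'

theorem pv_memo_contains (f : String → List (String × String)) :
    ∀ (l : List String) (d : PySem.Dict String (List (String × String))) (v : String),
      v ∈ l ∨ d.contains v = true →
      (l.foldl (fun d v => if d.contains v then d else d.insert v (f v)) d).contains v = true := by
  intro l
  induction l with
  | nil => intro d v hv; simpa using hv.elim (by simp) id
  | cons a t ih =>
    intro d v hv
    simp only [List.foldl_cons]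
    apply ih
    rcases hv with hv | hv
    · rcases List.mem_cons.mp hv with rfl | hvt
      · right
        by_cases hca : d.contains v = true
        · simp [hca]
        · simp only [hca, if_false, Bool.false_eq_true]
          exact PySem.Dict.contains_insert_self _ _ _
      · left; exact hvt
    · right
      by_cases hca : d.contains a = true
      · simpa [hca] using hv
      · simp only [hca, if_false, Bool.false_eq_true]
        rw [PySem.Dict.contains_insert]
        simp [hv]

theorem pv_memo (f : String → List (String × String)) (l : List String) (v : String)
    (hv : v ∈ l) :
    (l.foldl (fun d v => if d.contains v then d else d.insert v (f v)) PySem.Dict.empty).getD v []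
      = f v := by
  apply pv_memo_inv f l PySem.Dict.empty (by simp [PySem.Dict.contains_empty]) v
  exact pv_memo_contains f l PySem.Dict.empty v (Or.inl hv)

theorem fiat_involving_pairs_py_spec : Claim_equal_fiat_involving_pairs_py := by
  intro fiats stable_symbols _
  unfold Spec_fiat_involving_pairs_py
  simp only [fiat_involving_pairs_py, fiat_involving_pairs_py_alt]
  rw [pv_univrs]
  set fs : PySem.Set String := PySem.Set.ofList fiats with hfs
  set U : List String := fiats ++ stable_symbols.filter (fun s => !(PySem.Set.contains fs s)) with hU
  -- the row function B memoizes
  set f : String → List (String × String) := fun v =>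
    if PySem.Set.contains fs v
    then (U.filter (fun q => q != v)).map (fun q => (v, q))
    else fiats.map (fun q => (v, q)) with hf
  -- A as a flatMap over U
  have hA : U.foldl (fun out base =>
      U.foldl (fun out quote =>
        if base == quote then out
        else if !(PySem.Set.contains fs base) && !(PySem.Set.contains fs quote) then out
        else out ++ [(base, quote)]) out) []
      = U.flatMap (fun base => ((U.filter (pvPred fs base)).map (fun q => (base, q)))) := by
    have h : (fun (out : List (String × String)) base =>
        U.foldl (fun out quote =>
          if base == quote then out
          else if !(PySem.Set.contains fs base) && !(PySem.Set.contains fs quote) then out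
          else out ++ [(base, quote)]) out)
        = (fun out base => out ++ ((U.filter (pvPred fs base)).map (fun q => (base, q)))) := by
      funext o b; exact pv_inner fs b U o
    rw [h]
    simpa using PySem.List.foldl_append_eq_flatMap
      (fun base => ((U.filter (pvPred fs base)).map (fun q => (base, q)))) U []
  -- B as a flatMap over U, via the memo lemma
  have hB : U.foldl (fun out v =>
      out ++ (U.foldl (fun d v => if d.contains v then d else d.insert v (f v))
        PySem.Dict.empty).getD v []) []
      = U.flatMap f := by
    have h1 : U.foldl (fun out v =>
        out ++ (U.foldl (fun d v => if d.contains v then d else d.insert v (f v))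
          PySem.Dict.empty).getD v []) []
        = U.foldl (fun out v => out ++ f v) [] := by
      apply PySem.List.foldl_congr_mem
      intro out v hv
      rw [pv_memo f U v hv]
    rw [h1]
    simpa using PySem.List.foldl_append_eq_flatMap f U []
  rw [hA, hB]
  -- pointwise: for every base in U, A's row equals B's row
  have memFs : ∀ q ∈ fiats, PySem.Set.contains fs q = true := by
    intro q hq
    exact (PySem.Set.contains_iff fs q).mpr ((PySem.Set.mem_ofList fiats q).mpr hq)
  apply List.flatMap_congr
  intro base hb
  by_cases hcb : PySem.Set.contains fs base = true
  · -- fiat base: A's filter reduces to q != base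
    simp only [hf, hcb, if_true]
    congr 1
    apply List.filter_congr
    intro q _
    have hbm : base ∈ fs := (PySem.Set.contains_iff fs base).mp hcb
    simp [pvPred, bne, Bool.beq_comm, hbm]
  · -- stable base: A's filter over U = fiats ++ S keeps exactly the fiat part
    simp only [hf, hcb]
    rw [hU, List.filter_append]
    have h1 : fiats.filter (pvPred fs base) = fiats := by
      apply List.filter_eq_self.mpr
      intro q hq
      have hne : base ≠ q := by
        intro h; exact hcb (h ▸ memFs q hq)
      have hqm : q ∈ fs := (PySem.Set.contains_iff fs q).mp (memFs q hq)
      simp [pvPred, hne, hqm]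
    have h2 : (stable_symbols.filter (fun s => !(PySem.Set.contains fs s))).filter (pvPred fs base) = [] := by
      apply List.filter_eq_nil_iff.mpr
      intro q hq
      have hqc : PySem.Set.contains fs q = false := by
        have := (List.mem_filter.mp hq).2
        simpa using this
      have hbm : base ∉ fs := fun h => hcb ((PySem.Set.contains_iff fs base).mpr h)
      have hqm : q ∉ fs := fun h => by
        rw [(PySem.Set.contains_iff fs q).mpr h] at hqc; simp at hqc
      simp [pvPred, hbm, hqm]
    rw [h1, h2, List.map_append]
    simp
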